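-- pv_equiv track=rewrite | github.com/yuboooo/bonifacio | reduction.py | mutually_acceptable
-- ===== SOURCE A (Python) =====
-- from copy import deepcopy
--
-- def mutually_acceptable(firms_prefs, workers_prefs):
--     flatten_firms = {}
--     flatten_workers = {}
--     firms = []
--     workers = []
--     for keys, values in firms_prefs.items():
--         firms.append(keys)
--         flatten_firms[keys] = list(set(sum(values, [])))
--     for keys, values in workers_prefs.items():
--         workers.append(keys)
--         flatten_workers[keys] = list(set(sum(values, [])))
--
--     for keys, values in flatten_firms.items():
--         diff = list(set(workers).difference(values))
--         for d in diff:
--             for firm in deepcopy(workers_prefs)[d]: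
--                 if keys in firm:
--                     workers_prefs[d].remove(firm)
--     for keys, values in flatten_workers.items():
--         diff = list(set(firms).difference(values))
--         for d in diff:
--             for worker in deepcopy(firms_prefs)[d]:
--                 if keys in worker:
--                     firms_prefs[d].remove(worker)
--
--     return [firms_prefs, workers_prefs]
-- ===== SOURCE B (Python) =====
-- def mutually_acceptable(firms_prefs, workers_prefs):
--     flatten_firms = {f: set(sum(v, [])) for f, v in firms_prefs.items()}
--     flatten_workers = {w: set(sum(v, [])) for w, v in workers_prefs.items()}
--     for d, prefs in workers_prefs.items():
--         prefs[:] = [e for e in prefs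
--                     if all(d in flatten_firms[f] for f in flatten_firms if f in e)]
--     for f, prefs in firms_prefs.items():
--         prefs[:] = [e for e in prefs
--                     if all(f in flatten_workers[w] for w in flatten_workers if w in e)]
--     return [firms_prefs, workers_prefs]
-- ===== Notes on version B (the rewrite author's own statement) =====
-- stated objective: simpler
-- what changed: A prunes by iterating over firms, computing a set difference of workers per firm, and for each such worker removing matching entries one by one via deepcopy snapshots and list.remove; B inverts the nesting and rebuilds each preference list once, in place, with a single filter that keeps an entry only if every firm/worker key it mentions finds the owner acceptable.
import Mathlib
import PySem

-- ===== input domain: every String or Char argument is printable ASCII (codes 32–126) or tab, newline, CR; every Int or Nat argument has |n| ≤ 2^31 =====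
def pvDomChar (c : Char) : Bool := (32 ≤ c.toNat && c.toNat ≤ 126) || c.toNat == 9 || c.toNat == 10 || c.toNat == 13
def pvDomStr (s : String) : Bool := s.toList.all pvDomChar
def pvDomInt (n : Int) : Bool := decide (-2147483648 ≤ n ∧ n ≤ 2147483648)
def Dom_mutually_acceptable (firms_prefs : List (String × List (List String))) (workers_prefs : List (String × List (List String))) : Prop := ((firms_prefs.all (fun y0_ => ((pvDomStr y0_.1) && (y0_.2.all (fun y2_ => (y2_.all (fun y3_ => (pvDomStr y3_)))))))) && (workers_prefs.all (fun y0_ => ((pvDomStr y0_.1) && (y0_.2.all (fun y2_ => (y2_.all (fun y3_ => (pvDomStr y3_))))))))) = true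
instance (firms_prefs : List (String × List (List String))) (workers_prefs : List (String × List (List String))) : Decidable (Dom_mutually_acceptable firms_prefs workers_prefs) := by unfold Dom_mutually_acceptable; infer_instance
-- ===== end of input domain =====

-- B replaces A's per-firm set-difference / deepcopy-snapshot / remove() machinery with one
-- in-place filter per preference list (objective: simpler).  Both A and B mutate their dict
-- arguments in place in Python; the equivalence proved here is about the RETURN value.

-- ===== PORT A =====
-- loops 1/2: 'firms.append(keys); flatten[keys] = list(set(sum(values, [])))' (pair state: dict, key list)
def pvCollect (prefs : PySem.Dict String (List (List String))) :
    PySem.Dict String (List String) × List String :=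
  prefs.items.foldl
    (fun st kv => (st.1.insert kv.1 (PySem.Set.ofList kv.2.flatten), st.2 ++ [kv.1]))
    (PySem.Dict.empty, [])

-- 'for firm in deepcopy(workers_prefs)[d]: if keys in firm: workers_prefs[d].remove(firm)'
-- remove? is none exactly where Python's list.remove raises ValueError; that branch is unreachable
-- here (every matching snapshot entry is still present when removed), so the .getD fallback is
-- never taken and A raises nothing
def pvPruneOne (f : String) (W : PySem.Dict String (List (List String))) (d : String) :
    PySem.Dict String (List (List String)) :=
  (W.getD d []).foldl
    (fun W2 e => if e.contains f then W2.modify d [] (fun l => (PySem.List.remove? l e).getD l) else W2)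
    W

-- 'diff = list(set(names).difference(values)); for d in diff: …' (the result does not depend on
-- the hash order of diff: each d only updates its own key)
def pvPruneFirm (names : List String) (W : PySem.Dict String (List (List String)))
    (kv : String × List String) : PySem.Dict String (List (List String)) :=
  (PySem.Set.diff (PySem.Set.ofList names) kv.2).foldl (pvPruneOne kv.1) W

def mutually_acceptable (firms_prefs : List (String × List (List String))) (workers_prefs : List (String × List (List String))) : List (List (String × List (List String))) :=
  let fpd := PySem.Dict.ofList firms_prefs
  let wpd := PySem.Dict.ofList workers_prefs
  let cf := pvCollect fpd            -- (flatten_firms, firms)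
  let cw := pvCollect wpd            -- (flatten_workers, workers)
  let wpd2 := cf.1.items.foldl (pvPruneFirm cw.2) wpd
  let fpd2 := cw.1.items.foldl (pvPruneFirm cf.2) fpd
  [fpd2.items, wpd2.items]

-- ===== PORT B =====
-- '{k: set(sum(v, [])) for k, v in prefs.items()}'
def pvFlat (prefs : PySem.Dict String (List (List String))) : PySem.Dict String (List String) :=
  prefs.items.foldl (fun d kv => d.insert kv.1 (PySem.Set.ofList kv.2.flatten)) PySem.Dict.empty

-- 'all(d in flat[f] for f in flat if f in e)'
def pvKeep (flat : PySem.Dict String (List String)) (d : String) (e : List String) : Bool :=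
  flat.items.all (fun fs => !(e.contains fs.1) || fs.2.contains d)

-- 'for d, prefs in W.items(): prefs[:] = [e for e in prefs if keep(d, e)]' — slice assignment
-- replaces each list's contents in place, so on the dict it is a plain map over the items
def pvFilterAll (flat : PySem.Dict String (List String))
    (W : PySem.Dict String (List (List String))) : PySem.Dict String (List (List String)) :=
  PySem.Dict.mk (W.items.map (fun kv => (kv.1, kv.2.filter (pvKeep flat kv.1))))

def mutually_acceptable_alt (firms_prefs : List (String × List (List String))) (workers_prefs : List (String × List (List String))) : List (List (String × List (List String))) :=
  let fpd := PySem.Dict.ofList firms_prefs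
  let wpd := PySem.Dict.ofList workers_prefs
  let ff := pvFlat fpd
  let fw := pvFlat wpd
  let wpd2 := pvFilterAll ff wpd
  let fpd2 := pvFilterAll fw fpd
  [fpd2.items, wpd2.items]

-- ===== PRECONDITION & SPEC =====
def Spec_mutually_acceptable (firms_prefs : List (String × List (List String))) (workers_prefs : List (String × List (List String))) (out : List (List (String × List (List String)))) : Prop := out = mutually_acceptable_alt firms_prefs workers_prefs
instance (firms_prefs : List (String × List (List String))) (workers_prefs : List (String × List (List String))) (out : List (List (String × List (List String)))) : Decidable (Spec_mutually_acceptable firms_prefs workers_prefs out) := by unfold Spec_mutually_acceptable; infer_instance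

-- ===== CLAIM (what is proved, stated in full; the proofs are below) =====
def Claim_equal_mutually_acceptable : Prop := ∀ (firms_prefs : List (String × List (List String))) (workers_prefs : List (String × List (List String))), Dom_mutually_acceptable firms_prefs workers_prefs → Spec_mutually_acceptable firms_prefs workers_prefs (mutually_acceptable firms_prefs workers_prefs)

-- ===== LEMMAS AND PROOFS =====

-- keys of an ofList dict are distinct
theorem pv_nodup_ofList (ps : List (String × List (List String))) :
    (PySem.Dict.ofList ps).keys.Nodup := by
  unfold PySem.Dict.ofList PySem.Dict.update
  exact PySem.Dict.nodup_keys_foldl_insert_key ps Prod.fst _ _ (by simp [PySem.Dict.empty, PySem.Dict.keys])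

-- with distinct keys, find? locates exactly the item that holds a present key
theorem pv_find_of_mem {α : Type} (items : List (String × α)) (kv : String × α)
    (hnd : (items.map Prod.fst).Nodup) (hmem : kv ∈ items) :
    items.find? (fun p => p.1 == kv.1) = some kv := by
  induction items with
  | nil => cases hmem
  | cons a items ih =>
    simp only [List.map_cons, List.nodup_cons] at hnd
    rcases List.mem_cons.mp hmem with h | h
    · subst h; simp
    · have hne : (a.1 == kv.1) = false := by
        apply beq_false_of_ne
        intro he
        exact hnd.1 (he ▸ List.mem_map_of_mem h)
      rw [List.find?_cons, hne]
      exact ih hnd.2 h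

-- A's snapshot loop removes, from the list itself, every entry satisfying p: it is a filter
theorem pv_remove_fold {α : Type} [BEq α] [LawfulBEq α] (p : α → Bool) :
    ∀ (s pre : List α), (∀ x ∈ pre, p x = false) →
      s.foldl (fun acc e => if p e then (PySem.List.remove? acc e).getD acc else acc) (pre ++ s)
        = pre ++ s.filter (fun e => !p e) := by
  intro s
  induction s with
  | nil => intro pre h; simp
  | cons e s ih =>
    intro pre h
    by_cases hp : p e = true
    · have hnotpre : e ∉ pre := fun hmem => by simp [h e hmem] at hp
      have hrem : PySem.List.remove? (pre ++ e :: s) e = some (pre ++ s) := by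
        rw [PySem.List.remove?_eq_some_erase _ e (by simp), List.erase_append_right _ hnotpre,
          List.erase_cons_head]
      simp only [List.foldl_cons, hp, if_true, hrem, Option.getD_some]
      rw [ih pre h]
      simp [hp]
    · have hp' : p e = false := by simpa using hp
      simp only [List.foldl_cons, hp', Bool.false_eq_true, if_false]
      have : pre ++ e :: s = (pre ++ [e]) ++ s := by simp
      rw [this, ih (pre ++ [e]) (by intro x hx; rcases List.mem_append.mp hx with h1 | h1
                                    · exact h x h1
                                    · simp at h1; subst h1; exact hp')]
      simp [hp']

theorem pv_remove_fold_self {α : Type} [BEq α] [LawfulBEq α] (p : α → Bool) (l : List α) :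
    l.foldl (fun acc e => if p e then (PySem.List.remove? acc e).getD acc else acc) l
      = l.filter (fun e => !p e) := by
  have := pv_remove_fold p l [] (by simp)
  simpa using this

-- modify at a present key, with distinct keys, rewrites that item in place
theorem pv_items_modify (W : PySem.Dict String (List (List String))) (d : String)
    (g : List (List String) → List (List String))
    (hnd : W.keys.Nodup) (hd : d ∈ W.keys) :
    (W.modify d [] g).items = W.items.map (fun kv => if kv.1 = d then (d, g kv.2) else kv) := by
  have hcont : W.contains d = true := by
    simp only [PySem.Dict.contains, List.any_eq_true]
    simp only [PySem.Dict.keys, List.mem_map] at hd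
    obtain ⟨p, hp, hpd⟩ := hd
    exact ⟨p, hp, by simp [hpd]⟩
  unfold PySem.Dict.modify PySem.Dict.insert
  rw [if_pos hcont]
  apply List.map_congr_left
  intro p hp
  by_cases hpd : p.1 = d
  · have hfind : W.items.find? (fun q => q.1 == p.1) = some p :=
      pv_find_of_mem W.items p hnd hp
    have : W.getD d [] = p.2 := by
      simp only [PySem.Dict.getD, PySem.Dict.get?]
      rw [← hpd, hfind]; rfl
    simp [hpd, this]
  · simp [hpd]

-- an in-place item map leaves the key list unchanged
theorem pv_keys_map (items : List (String × List (List String)))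
    (F : String × List (List String) → List (List String)) (d : String) :
    (items.map (fun kv => if kv.1 = d then (d, F kv) else kv)).map Prod.fst
      = items.map Prod.fst := by
  rw [List.map_map]
  apply List.map_congr_left
  intro p _
  by_cases h : p.1 = d <;> simp [h, Function.comp]

theorem pv_keys_map2 (items : List (String × List (List String)))
    (F : String × List (List String) → List (List String)) :
    (items.map (fun kv => (kv.1, F kv))).map Prod.fst = items.map Prod.fst := by
  rw [List.map_map]; rfl

-- the dict-level snapshot loop acts only on the item at d
theorem pv_prune_list (f : String) (s : List (List String)) :
    ∀ (W : PySem.Dict String (List (List String))) (d : String),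
    W.keys.Nodup → d ∈ W.keys →
    (s.foldl (fun W2 e => if e.contains f then W2.modify d [] (fun l => (PySem.List.remove? l e).getD l) else W2) W).items
      = W.items.map (fun kv => if kv.1 = d then
          (d, s.foldl (fun acc e => if e.contains f then (PySem.List.remove? acc e).getD acc else acc) kv.2) else kv) := by
  induction s with
  | nil =>
    intro W d _ _
    simp only [List.foldl_nil]
    conv_lhs => rw [← List.map_id W.items]
    apply List.map_congr_left
    intro p _
    by_cases h : p.1 = d
    · simp [id, ← h]
    · simp [id, h]
  | cons e s ih =>
    intro W d hnd hd
    by_cases he : e.contains f = true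
    · have hitems := pv_items_modify W d (fun l => (PySem.List.remove? l e).getD l) hnd hd
      have hkeys : (W.modify d [] (fun l => (PySem.List.remove? l e).getD l)).keys = W.keys := by
        show (W.modify d [] _).items.map Prod.fst = W.items.map Prod.fst
        rw [hitems]
        exact pv_keys_map W.items _ d
      simp only [List.foldl_cons, he, if_true]
      rw [ih _ d (by rw [hkeys]; exact hnd) (by rw [hkeys]; exact hd), hitems, List.map_map]
      apply List.map_congr_left
      intro p _
      by_cases hpd : p.1 = d
      · simp [hpd, Function.comp]
      · simp [hpd, Function.comp]
    · have he' : e.contains f = false := by simpa using he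
      simp only [List.foldl_cons, he', Bool.false_eq_true, if_false]
      exact ih W d hnd hd

theorem pv_pruneOne_items (f : String) (W : PySem.Dict String (List (List String))) (d : String)
    (hnd : W.keys.Nodup) (hd : d ∈ W.keys) :
    (pvPruneOne f W d).items
      = W.items.map (fun kv => if kv.1 = d then (d, kv.2.filter (fun e => !e.contains f)) else kv) := by
  unfold pvPruneOne
  rw [pv_prune_list f _ W d hnd hd]
  apply List.map_congr_left
  intro p hp
  by_cases hpd : p.1 = d
  · have : W.getD d [] = p.2 := by
      simp only [PySem.Dict.getD, PySem.Dict.get?]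
      rw [← hpd, pv_find_of_mem W.items p hnd hp]; rfl
    simp only [hpd, if_true, this]
    rw [pv_remove_fold_self (fun e => e.contains f) p.2]
  · simp [hpd]

theorem pv_pruneMany_items (f : String) (D : List String) :
    ∀ (W : PySem.Dict String (List (List String))),
    W.keys.Nodup → (∀ d ∈ D, d ∈ W.keys) →
    (D.foldl (pvPruneOne f) W).items
      = W.items.map (fun kv => if kv.1 ∈ D then (kv.1, kv.2.filter (fun e => !e.contains f)) else kv) := by
  induction D with
  | nil =>
    intro W _ _
    simp only [List.foldl_nil, List.not_mem_nil, if_false]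
    conv_lhs => rw [← List.map_id W.items]
    rfl
  | cons d D ih =>
    intro W hnd hD
    simp only [List.foldl_cons]
    have hitems := pv_pruneOne_items f W d hnd (hD d (List.mem_cons_self))
    have hkeys : (pvPruneOne f W d).keys = W.keys := by
      show (pvPruneOne f W d).items.map Prod.fst = W.items.map Prod.fst
      rw [hitems]
      exact pv_keys_map W.items _ d
    rw [ih _ (by rw [hkeys]; exact hnd)
          (fun d' hd' => by rw [hkeys]; exact hD d' (List.mem_cons_of_mem _ hd')),
        hitems, List.map_map]
    apply List.map_congr_left
    intro p _
    by_cases hpd : p.1 = d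
    · by_cases hpD : p.1 ∈ D
      · simp [Function.comp, hpd, List.filter_filter]
      · simp [Function.comp, hpd]
    · by_cases hpD : p.1 ∈ D <;>
        simp [Function.comp, hpd]

-- one firm's pass over workers_prefs: every list is filtered by that firm's acceptability
theorem pv_pruneFirm_items (fs : String × List String)
    (W : PySem.Dict String (List (List String))) (hnd : W.keys.Nodup) :
    (pvPruneFirm W.keys W fs).items
      = W.items.map (fun kv => (kv.1, kv.2.filter (fun e => !e.contains fs.1 || fs.2.contains kv.1))) := by
  unfold pvPruneFirm
  rw [PySem.Set.ofList_eq_self_of_nodup W.keys hnd]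
  have hsub : ∀ d ∈ PySem.Set.diff W.keys fs.2, d ∈ W.keys := by
    intro d hd
    exact (List.mem_filter.mp hd).1
  rw [pv_pruneMany_items fs.1 _ W hnd hsub]
  apply List.map_congr_left
  intro p hp
  have hpk : p.1 ∈ W.keys := List.mem_map_of_mem hp
  by_cases hc : fs.2.contains p.1 = true
  · have : p.1 ∉ PySem.Set.diff W.keys fs.2 := by
      intro hmem
      have h2 := (List.mem_filter.mp hmem).2
      simp [PySem.Set.contains] at h2
      exact h2 (by simpa using hc)
    simp only [this, if_false, hc]
    rw [show (fun e : List String => !e.contains fs.1 || true) = (fun _ => true) by funext e; simp,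
      List.filter_true]
  · have hc' : fs.2.contains p.1 = false := by simpa using hc
    have : p.1 ∈ PySem.Set.diff W.keys fs.2 := by
      apply List.mem_filter.mpr
      refine ⟨hpk, ?_⟩
      simp [PySem.Set.contains]
      simpa using hc'
    simp only [this, if_true, hc']
    rw [show (fun e : List String => !e.contains fs.1 || false) = (fun e : List String => !e.contains fs.1) by funext e; simp]

-- A's whole pruning pass is B's conjunction filter
theorem pv_mainFold_items (L : List (String × List String)) :
    ∀ (W : PySem.Dict String (List (List String))), W.keys.Nodup →
    (L.foldl (pvPruneFirm W.keys) W).items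
      = W.items.map (fun kv => (kv.1, kv.2.filter (fun e =>
          L.all (fun fs => !e.contains fs.1 || fs.2.contains kv.1)))) := by
  induction L with
  | nil =>
    intro W _
    simp only [List.foldl_nil, List.all_nil, List.filter_true]
    conv_lhs => rw [← List.map_id W.items]
    rfl
  | cons fs L ih =>
    intro W hnd
    simp only [List.foldl_cons]
    have hitems := pv_pruneFirm_items fs W hnd
    have hkeys : (pvPruneFirm W.keys W fs).keys = W.keys := by
      show (pvPruneFirm W.keys W fs).items.map Prod.fst = W.items.map Prod.fst
      rw [hitems]
      exact pv_keys_map2 W.items _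
    rw [show L.foldl (pvPruneFirm W.keys) (pvPruneFirm W.keys W fs)
          = L.foldl (pvPruneFirm (pvPruneFirm W.keys W fs).keys) (pvPruneFirm W.keys W fs) by rw [hkeys]]
    rw [ih _ (by rw [hkeys]; exact hnd), hitems, List.map_map]
    apply List.map_congr_left
    intro p _
    simp only [Function.comp, List.filter_filter, List.all_cons]
    congr 1
    apply List.filter_congr
    intro e _
    cases h1 : e.contains fs.1 <;> cases h2 : fs.2.contains p.1 <;>
      cases h3 : L.all (fun gs => !e.contains gs.1 || gs.2.contains p.1) <;> simp_all

-- A's first double loop computes B's flatten dict together with the key list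
theorem pv_collect_eq (prefs : PySem.Dict String (List (List String))) :
    pvCollect prefs = (pvFlat prefs, prefs.keys) := by
  unfold pvCollect pvFlat
  rw [PySem.List.foldl_prod_mk (fun (a : PySem.Dict String (List String)) kv => a.insert kv.1 (PySem.Set.ofList kv.2.flatten)) (fun b kv => b ++ [kv.1]) prefs.items PySem.Dict.empty [], PySem.List.foldl_append_singleton_eq_map]
  rfl

-- ===== VERDICT (by name: the statement is the Claim_ definition above) =====
theorem mutually_acceptable_spec : Claim_equal_mutually_acceptable := by
  intro fp wp _
  unfold Spec_mutually_acceptable mutually_acceptable mutually_acceptable_alt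
  dsimp only
  rw [pv_collect_eq, pv_collect_eq]
  rw [pv_mainFold_items _ _ (pv_nodup_ofList wp), pv_mainFold_items _ _ (pv_nodup_ofList fp)]
  rfl
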